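-- pv_equiv track=rewrite | github.com/dariober/bioinformatics-cafe | roslin/20100521_s_7_pairend_filter_tophat.py | trim_sequence
-- ===== SOURCE A (Python) =====
-- def trim_sequence(seq_quality, min_trim_q, n_low_q):
--     """
--     trim_sequence() takes a string of Solexa base quality scores ('aaaBB]]]...')
--     and return the length where quality drops below a certain threshold
--     (low_q). The number of tolerated low quality bases is n_low_q
--     E.g.
--     trim_sequence('aaaBaaaBaaaBaaa', 20, 2)
--     returns--> 11 (i.e. the length of 'aaaBaaaBaaa')
--     trim_sequence('aaaBaaaBaaBBaaa', 20, 2)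
--     returns--> 10 (aaaBaaaBaa)
--     """
--     seq_quality = [ord(x) - 64 for x in seq_quality]
--     low_q = 0
--     for i in range(0, len(seq_quality)):
--         ## Scan the sequence quality to find where quality drops below the threshold
--         if seq_quality[i] < min_trim_q:
--             low_q += 1
--
--         ## At the second drop, trim the sequence
--         if low_q == n_low_q + 1:   ## Change int here to trim after third, forth etc. drop
--             seq_trimmed = seq_quality[0 : i]
--             ## If the last base has quality below the threshold, drop it
--             if seq_trimmed[-1] < min_trim_q:
--                 seq_trimmed = seq_trimmed[:-1]
--             break
--     try:
--         return(len(seq_trimmed))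
--     except:
--         return(len(seq_quality))
-- ===== SOURCE B (Python) =====
-- def trim_sequence(seq_quality, min_trim_q, n_low_q):
--     # Prefix-sum + binary-search reformulation: cum[i] = number of low-quality
--     # bases among the first i, then bisect_left for the first prefix holding
--     # n_low_q+1 drops; adjust by one if the base just before the cut is low.
--     flags = [1 if ord(c) - 64 < min_trim_q else 0 for c in seq_quality]
--     cum = [0]
--     total = 0
--     for f in flags:
--         total += f
--         cum.append(total)
--     if n_low_q < 0 or cum[len(flags)] <= n_low_q:
--         return len(flags)
--     target = n_low_q + 1
--     lo, hi = 0, len(cum)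
--     while lo < hi:
--         mid = (lo + hi) // 2
--         if cum[mid] < target:
--             lo = mid + 1
--         else:
--             hi = mid
--     p = lo - 1
--     if p > 0 and flags[p - 1]:
--         return p - 1
--     return p
-- ===== Notes on version B (the rewrite author's own statement) =====
-- stated objective: alternative
-- what changed: Replaces the stateful counting scan with break/slicing/try-except by a staged computation: build 0/1 drop flags, a prefix-sum array of drop counts, binary-search (bisect_left by hand) for the first prefix containing n_low_q+1 drops, and adjust by one if the base just before the cut is also low.
-- crash fix: A raises IndexError (empty slice indexed with [-1]) when the cut lands at position 0, i.e. when n_low_q == 0 and the first base is below threshold, or when n_low_q == -1 and the first base is at or above threshold; B returns 0 resp. len(seq_quality) there. — e.g. on trim_sequence("a", 20, -1): A raises IndexError, B returns 1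
import Mathlib
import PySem

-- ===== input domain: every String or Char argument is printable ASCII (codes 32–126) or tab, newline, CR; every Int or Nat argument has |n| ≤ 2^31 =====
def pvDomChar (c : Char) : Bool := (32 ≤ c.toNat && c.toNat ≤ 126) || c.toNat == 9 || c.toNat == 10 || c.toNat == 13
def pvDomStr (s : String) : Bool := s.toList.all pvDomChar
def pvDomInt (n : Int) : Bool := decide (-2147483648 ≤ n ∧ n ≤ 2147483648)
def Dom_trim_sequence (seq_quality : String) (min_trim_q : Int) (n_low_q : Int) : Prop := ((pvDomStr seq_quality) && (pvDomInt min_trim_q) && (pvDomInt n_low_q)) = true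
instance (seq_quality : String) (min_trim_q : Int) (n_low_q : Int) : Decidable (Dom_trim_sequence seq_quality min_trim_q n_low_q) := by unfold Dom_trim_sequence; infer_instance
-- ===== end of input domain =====

-- B replaces A's stateful scan (counter, break, slice, try/except NameError) by 0/1 drop flags,
-- a prefix-sum array of drop counts and a hand-written bisect_left for the cut point
-- (alternative decomposition; same values wherever A returns, not faster).

-- ===== PORT A =====
-- the trigger body: seq_trimmed = seq_quality[0:i]; drop the last base if low; len(seq_trimmed)
def pvTrimA (q : List Int) (minq : Int) (i : Nat) : Int :=
  let t := PySem.List.slice q (some 0) (some (i : Int))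
  -- Python 'seq_trimmed[-1]' raises IndexError when t = [] (excluded by Pre_); the getD default makes the branch a no-op there
  let t' := if (PySem.List.pyGet? t (-1)).getD minq < minq then PySem.List.slice t none (some (-1)) else t
  (t'.length : Int)

-- the 'for i in range(0, len(seq_quality))' loop; fuel = remaining indices, so q.getD i 0 is q[i] (always in range)
def pvALoop (q : List Int) (minq nq : Int) : Nat → Int → Nat → Option Int
  | _, _, 0 => none
  | i, low, fuel+1 =>
    let low' := if q.getD i 0 < minq then low + 1 else low
    if low' = nq + 1 then some (pvTrimA q minq i)
    else pvALoop q minq nq (i+1) low' fuel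

def trim_sequence (seq_quality : String) (min_trim_q : Int) (n_low_q : Int) : Int :=
  let q := seq_quality.toList.map (fun c => ((c.toNat : Int) - 64))
  match pvALoop q min_trim_q n_low_q 0 0 q.length with
  | some r => r                       -- seq_trimmed was assigned: return len(seq_trimmed)
  | none => (q.length : Int)          -- NameError caught: return len(seq_quality)

-- ===== PORT B =====
-- the 'while lo < hi' bisect_left loop; fuel bounds the iteration count (hi - lo shrinks each turn)
def pvBisect (cum : List Int) (t : Int) : Nat → Nat → Nat → Nat
  | lo, _, 0 => lo
  | lo, hi, fuel+1 =>
    if lo < hi then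
      -- mid = (lo + hi) // 2, inlined
      if cum.getD ((lo + hi) / 2) 0 < t then pvBisect cum t ((lo + hi) / 2 + 1) hi fuel
      else pvBisect cum t lo ((lo + hi) / 2) fuel
    else lo

def trim_sequence_alt (seq_quality : String) (min_trim_q : Int) (n_low_q : Int) : Int :=
  let flags := seq_quality.toList.map (fun c => if ((c.toNat : Int) - 64) < min_trim_q then (1 : Int) else 0)
  -- cum = [0]; total = 0; for f in flags: total += f; cum.append(total)
  let st := flags.foldl (fun (st : Int × List Int) f => (st.1 + f, st.2 ++ [st.1 + f])) (0, [0])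
  let cum := st.2
  if n_low_q < 0 ∨ (PySem.List.pyGet? cum (flags.length : Int)).getD 0 ≤ n_low_q then
    (flags.length : Int)
  else
    let lo := pvBisect cum (n_low_q + 1) 0 cum.length cum.length
    let p := (lo : Int) - 1
    if 0 < p ∧ (PySem.List.pyGet? flags (p - 1)).getD 0 ≠ 0 then p - 1 else p

-- ===== PRECONDITION & SPEC =====
-- quality value of the first base (used only to state where A raises)
def pvHeadQ (seq_quality : String) : Int := ((seq_quality.toList.headD 'A').toNat : Int) - 64

-- Pre_ excludes exactly the inputs where A raises IndexError: the cut index is 0, i.e.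
-- n_low_q == 0 with a low first base, or n_low_q == -1 with a non-low first base.
def Pre_trim_sequence (seq_quality : String) (min_trim_q : Int) (n_low_q : Int) : Prop :=
  seq_quality.toList = [] ∨
    (¬(n_low_q = 0 ∧ pvHeadQ seq_quality < min_trim_q) ∧
     ¬(n_low_q = -1 ∧ min_trim_q ≤ pvHeadQ seq_quality))
instance (seq_quality : String) (min_trim_q : Int) (n_low_q : Int) : Decidable (Pre_trim_sequence seq_quality min_trim_q n_low_q) := by unfold Pre_trim_sequence; infer_instance

def pvWitness_trim_sequence : String × Int × Int := ("aaaBaaaBaaaBaaa", 20, 2)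

-- A raises IndexError when the cut index is 0 (n_low_q = 0 and first base low, or n_low_q = -1 and first base not low); B returns 0 resp. the full length there.
def Raises_trim_sequence (seq_quality : String) (min_trim_q : Int) (n_low_q : Int) : Prop :=
  seq_quality.toList ≠ [] ∧
    ((n_low_q = 0 ∧ pvHeadQ seq_quality < min_trim_q) ∨
     (n_low_q = -1 ∧ min_trim_q ≤ pvHeadQ seq_quality))
instance (seq_quality : String) (min_trim_q : Int) (n_low_q : Int) : Decidable (Raises_trim_sequence seq_quality min_trim_q n_low_q) := by unfold Raises_trim_sequence; infer_instance
def pvRaiseWitness_trim_sequence : String × Int × Int := ("a", 20, -1)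
def pvRaiseWitnessOut_trim_sequence : Int := 1

def Spec_trim_sequence (seq_quality : String) (min_trim_q : Int) (n_low_q : Int) (out : Int) : Prop := out = trim_sequence_alt seq_quality min_trim_q n_low_q
instance (seq_quality : String) (min_trim_q : Int) (n_low_q : Int) (out : Int) : Decidable (Spec_trim_sequence seq_quality min_trim_q n_low_q out) := by unfold Spec_trim_sequence; infer_instance

-- ===== CLAIM (what is proved, stated in full; the proofs are below) =====
def Claim_equal_trim_sequence : Prop := ∀ (seq_quality : String) (min_trim_q : Int) (n_low_q : Int), Dom_trim_sequence seq_quality min_trim_q n_low_q → Pre_trim_sequence seq_quality min_trim_q n_low_q → Spec_trim_sequence seq_quality min_trim_q n_low_q (trim_sequence seq_quality min_trim_q n_low_q)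
def Claim_raises_trim_sequence : Prop := (∀ (seq_quality : String) (min_trim_q : Int) (n_low_q : Int), Dom_trim_sequence seq_quality min_trim_q n_low_q → Raises_trim_sequence seq_quality min_trim_q n_low_q → ¬ Pre_trim_sequence seq_quality min_trim_q n_low_q) ∧ (Dom_trim_sequence (pvRaiseWitness_trim_sequence.1) (pvRaiseWitness_trim_sequence.2.1) (pvRaiseWitness_trim_sequence.2.2) ∧ Raises_trim_sequence (pvRaiseWitness_trim_sequence.1) (pvRaiseWitness_trim_sequence.2.1) (pvRaiseWitness_trim_sequence.2.2) ∧ trim_sequence_alt (pvRaiseWitness_trim_sequence.1) (pvRaiseWitness_trim_sequence.2.1) (pvRaiseWitness_trim_sequence.2.2) = pvRaiseWitnessOut_trim_sequence)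

-- ===== LEMMAS AND PROOFS =====
-- drop predicate, drop-position list and drop count of a prefix
def pvP (q : List Int) (minq : Int) (j : Nat) : Bool := decide (q.getD j 0 < minq)
def pvD (q : List Int) (minq : Int) : List Nat := (List.range q.length).filter (pvP q minq)
def pvC (q : List Int) (minq : Int) (i : Nat) : Nat := ((List.range i).filter (pvP q minq)).length

theorem pvC_zero (q : List Int) (minq : Int) : pvC q minq 0 = 0 := rfl

theorem pvC_succ (q : List Int) (minq : Int) (i : Nat) :
    pvC q minq (i+1) = pvC q minq i + (if pvP q minq i then 1 else 0) := by
  simp [pvC, List.range_succ, List.filter_append]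
  by_cases h : pvP q minq i <;> simp [h]

theorem pvC_mono (q : List Int) (minq : Int) {i k : Nat} (h : i ≤ k) :
    pvC q minq i ≤ pvC q minq k := by
  induction k with
  | zero => have : i = 0 := by omega
            simp [this]
  | succ k ih =>
    rcases Nat.lt_or_ge i (k+1) with h' | h'
    · have := ih (by omega)
      rw [pvC_succ]; split <;> omega
    · have : i = k + 1 := by omega
      simp [this]

-- A's loop never triggers once low has passed nq+1
theorem pvALoop_none (q : List Int) (minq nq : Int) :
    ∀ (fuel : Nat) (i : Nat) (low : Int), nq + 1 < low →
      pvALoop q minq nq i low fuel = none := by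
  intro fuel
  induction fuel with
  | zero => intro i low _; rfl
  | succ fuel ih =>
    intro i low h
    by_cases hP : q.getD i 0 < minq
    · simp only [pvALoop, if_pos hP]
      rw [if_neg (by omega)]
      exact ih _ _ (by omega)
    · simp only [pvALoop, if_neg hP]
      rw [if_neg (by omega)]
      exact ih _ _ (by omega)

theorem pv_range_split (i n : Nat) (h : i ≤ n) :
    List.range n = List.range i ++ List.range' i (n - i) := by
  rw [List.range_eq_range', List.range_eq_range']
  have := @List.range'_append 0 i (n-i) 1
  simp only [Nat.one_mul, Nat.zero_add] at this
  rw [this]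
  congr 1
  omega

-- the position with exactly m low predecessors, itself low, is entry m of the drop list
theorem pvD_nth (q : List Int) (minq : Int) {i m : Nat}
    (hi : i < q.length) (hP : pvP q minq i = true) (hC : pvC q minq i = m) :
    m < (pvD q minq).length ∧ (pvD q minq).getD m 0 = i := by
  have hsplit : List.range q.length = List.range i ++ i :: List.range' (i+1) (q.length - i - 1) := by
    rw [pv_range_split i q.length (by omega)]
    congr 1
    have h2 : q.length - i = (q.length - i - 1) + 1 := by omega
    rw [h2, List.range'_succ]
    simp
  have hd : pvD q minq = (List.range i).filter (pvP q minq) ++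
      i :: (List.range' (i+1) (q.length - i - 1)).filter (pvP q minq) := by
    rw [pvD, hsplit, List.filter_append, List.filter_cons_of_pos hP]
  constructor
  · rw [hd]
    simp [List.length_append]
    have : ((List.range i).filter (pvP q minq)).length = m := hC
    omega
  · rw [hd]
    have hlen : ((List.range i).filter (pvP q minq)).length = m := hC
    rw [← hlen]
    simp [List.getD]

-- characterisation of A's loop from a consistent state: it returns the trim value at drop
-- position number m when there are more than m drops, and nothing otherwise
theorem pvALoop_main (q : List Int) (minq : Int) (m : Nat) :
    ∀ (fuel i : Nat), i + fuel = q.length → pvC q minq i ≤ m →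
      pvALoop q minq (m : Int) i ((pvC q minq i : Nat) : Int) fuel =
        (if m < pvC q minq q.length then some (pvTrimA q minq ((pvD q minq).getD m 0)) else none) := by
  intro fuel
  induction fuel with
  | zero =>
    intro i hlen hC
    have : i = q.length := by omega
    subst this
    rw [if_neg (by omega)]
    rfl
  | succ fuel ih =>
    intro i hlen hC
    have hi : i < q.length := by omega
    by_cases hP : q.getD i 0 < minq
    · simp only [pvALoop, if_pos hP]
      by_cases hm : pvC q minq i = m
      · have hcond : ((pvC q minq i : Nat) : Int) + 1 = (m : Int) + 1 := by
          rw [hm]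
        rw [if_pos hcond]
        have hnth := pvD_nth q minq hi (by simp only [pvP, decide_eq_true_eq]; exact hP) hm
        have hsucc : pvC q minq (i+1) = m + 1 := by
          rw [pvC_succ, if_pos (by simp only [pvP, decide_eq_true_eq]; exact hP), hm]
        have hlt : m < pvC q minq q.length := by
          have := pvC_mono q minq (show i + 1 ≤ q.length by omega)
          omega
        rw [if_pos hlt, hnth.2]
      · have hcond : ¬ (((pvC q minq i : Nat) : Int) + 1 = (m : Int) + 1) := by
          intro h
          exact hm (by exact_mod_cast (by omega : ((pvC q minq i : Nat) : Int) = (m : Int)))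
        rw [if_neg hcond]
        have hsucc : pvC q minq (i+1) = pvC q minq i + 1 := by
          rw [pvC_succ, if_pos (by simp only [pvP, decide_eq_true_eq]; exact hP)]
        have : ((pvC q minq i : Nat) : Int) + 1 = ((pvC q minq (i+1) : Nat) : Int) := by
          rw [hsucc]; push_cast; ring
        rw [this]
        exact ih (i+1) (by omega) (by omega)
    · simp only [pvALoop, if_neg hP]
      have hcond : ¬ (((pvC q minq i : Nat) : Int) = (m : Int) + 1) := by
        intro h
        have : pvC q minq i = m + 1 := by exact_mod_cast h
        omega
      rw [if_neg hcond]
      have hsucc : pvC q minq (i+1) = pvC q minq i := by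
        rw [pvC_succ, if_neg (by simp only [pvP, decide_eq_true_eq]; simpa using hP)]
        omega
      rw [show ((pvC q minq i : Nat) : Int) = ((pvC q minq (i+1) : Nat) : Int) by rw [hsucc]]
      exact ih (i+1) (by omega) (by omega)

-- B's cum-building fold: the resulting list is the start list followed by the running sums
theorem pv_cum_fold (fs : List Int) : ∀ (t : Int) (c : List Int),
    (fs.foldl (fun (st : Int × List Int) f => (st.1 + f, st.2 ++ [st.1 + f])) (t, c)).2
      = c ++ (List.range fs.length).map (fun i => t + ((fs.take (i+1)).sum)) := by
  induction fs with
  | nil => intro t c; simp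
  | cons f fs ih =>
    intro t c
    simp only [List.foldl_cons, List.length_cons, List.range_succ_eq_map, List.map_cons,
      List.map_map]
    rw [ih]
    simp only [List.take_succ_cons, List.sum_cons, List.take_zero, List.sum_nil, List.append_assoc]
    congr 1
    simp only [List.singleton_append, List.cons.injEq]
    refine ⟨by ring, ?_⟩
    apply List.map_congr_left
    intro a _
    simp only [Function.comp_apply]
    ring

-- flag sums are drop counts
theorem pv_flag_sum (q : List Int) (minq : Int) :
    ∀ (i : Nat), i ≤ q.length →
      ((q.map (fun v => if v < minq then (1:Int) else 0)).take i).sum = (pvC q minq i : Int) := by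
  intro i
  induction i with
  | zero => intro _; simp [pvC_zero]
  | succ i ih =>
    intro h
    have hi : i < q.length := by omega
    have hgd : q.getD i 0 = q[i] := List.getD_eq_getElem _ _ hi
    have hx : (q.map (fun v => if v < minq then (1:Int) else 0))[i]? =
        some (if q[i] < minq then (1:Int) else 0) := by
      rw [List.getElem?_map, List.getElem?_eq_getElem hi, Option.map_some]
    rw [List.take_add_one, hx, List.sum_append, ih (by omega), pvC_succ]
    by_cases hp : q[i] < minq <;>
      simp [pvP, hp, List.getD, List.getElem?_eq_getElem hi]

-- bisect_left invariant: from a bracketing state it returns the first index with cum[i] ≥ t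
theorem pvBisect_spec (cum : List Int) (t : Int)
    (hmono : ∀ i j : Nat, i ≤ j → j < cum.length → cum.getD i 0 ≤ cum.getD j 0) :
    ∀ (fuel lo hi : Nat), hi ≤ cum.length → lo ≤ hi → hi - lo ≤ fuel →
      (∀ i, i < lo → cum.getD i 0 < t) →
      (∀ i, hi ≤ i → i < cum.length → t ≤ cum.getD i 0) →
      (∀ i, i < pvBisect cum t lo hi fuel → cum.getD i 0 < t) ∧
      (∀ i, pvBisect cum t lo hi fuel ≤ i → i < cum.length → t ≤ cum.getD i 0) ∧
      lo ≤ pvBisect cum t lo hi fuel ∧ pvBisect cum t lo hi fuel ≤ hi := by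
  intro fuel
  induction fuel with
  | zero =>
    intro lo hi hle hlh hfuel hIlo hIhi
    have : lo = hi := by omega
    subst this
    exact ⟨hIlo, fun i h1 h2 => hIhi i h1 h2, le_refl _, le_refl _⟩
  | succ fuel ih =>
    intro lo hi hle hlh hfuel hIlo hIhi
    by_cases hlt : lo < hi
    · simp only [pvBisect, if_pos hlt]
      by_cases hc : cum.getD ((lo + hi) / 2) 0 < t
      · rw [if_pos hc]
        have hIlo' : ∀ i, i < (lo + hi) / 2 + 1 → cum.getD i 0 < t := by
          intro i hi'
          exact lt_of_le_of_lt (hmono i ((lo + hi) / 2) (by omega) (by omega)) hc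
        obtain ⟨h1, h2, h3, h4⟩ := ih ((lo + hi) / 2 + 1) hi hle (by omega) (by omega) hIlo' hIhi
        exact ⟨h1, h2, by omega, h4⟩
      · rw [if_neg hc]
        have hIhi' : ∀ i, (lo + hi) / 2 ≤ i → i < cum.length → t ≤ cum.getD i 0 := by
          intro i h1 h2
          exact le_trans (le_of_not_gt hc) (hmono ((lo + hi) / 2) i h1 h2)
        obtain ⟨h1, h2, h3, h4⟩ := ih lo ((lo + hi) / 2) (by omega) (by omega) (by omega) hIlo hIhi'
        exact ⟨h1, h2, h3, by omega⟩
    · simp only [pvBisect, if_neg hlt]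
      have : lo = hi := by omega
      subst this
      exact ⟨hIlo, fun i h1 h2 => hIhi i h1 h2, le_refl _, le_refl _⟩

-- A's trigger body (slice, [-1] check, slice[:-1]) equals the arithmetic on the cut index
theorem pv_trim_eq (q : List Int) (minq : Int) (j : Nat) (hj : j ≤ q.length) :
    pvTrimA q minq j =
      (if 0 < (j : Int) ∧ (PySem.List.pyGet? q ((j : Int) - 1)).getD 0 < minq
       then (j : Int) - 1 else (j : Int)) := by
  simp only [pvTrimA, PySem.List.slice_zero_start, PySem.List.slice_to_natCast]
  cases j with
  | zero =>
    simp [PySem.List.pyGet?_neg_one]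
  | succ k =>
    have hk : k < q.length := by omega
    have htake : (q.take (k+1)).length = k + 1 := by
      simp [List.length_take]; omega
    have hlast : (q.take (k+1)).getLast? = some q[k] := by
      rw [List.getLast?_eq_getElem?, htake]
      simp only [Nat.add_sub_cancel]
      rw [List.getElem?_take_of_lt (by omega)]
      exact List.getElem?_eq_getElem hk
    have hget : PySem.List.pyGet? q ((↑(k+1) : Int) - 1) = some q[k] := by
      have : ((↑(k+1) : Int) - 1) = ((k : Nat) : Int) := by push_cast; ring
      rw [this, PySem.List.pyGet?_natCast]
      exact List.getElem?_eq_getElem hk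
    rw [PySem.List.pyGet?_neg_one, hlast, hget]
    simp only [Option.getD_some]
    by_cases hq : q[k] < minq
    · rw [if_pos hq, if_pos (by exact ⟨by positivity, hq⟩)]
      rw [PySem.List.slice_to_neg_one, List.length_dropLast, htake]
      push_cast
      ring
    · rw [if_neg hq, if_neg (by rintro ⟨-, h⟩; exact hq h)]
      rw [htake]

theorem pv_main (s : String) (minq nq : Int) (hPre : Pre_trim_sequence s minq nq) :
    trim_sequence s minq nq = trim_sequence_alt s minq nq := by
  simp only [trim_sequence, trim_sequence_alt]
  set q := s.toList.map (fun c => ((c.toNat : Int) - 64)) with hq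
  set flags := s.toList.map (fun c => if ((c.toNat : Int) - 64) < minq then (1:Int) else 0) with hflags
  have hfq : flags = q.map (fun v => if v < minq then (1:Int) else 0) := by
    rw [hflags, hq, List.map_map]
    apply List.map_congr_left
    intro c _
    rfl
  have hfl : flags.length = q.length := by rw [hfq]; simp
  -- the cum list and its pointwise value
  have hcum : (flags.foldl (fun (st : Int × List Int) f => (st.1 + f, st.2 ++ [st.1 + f])) (0, [0])).2
      = (0:Int) :: (List.range q.length).map (fun i => (pvC q minq (i+1) : Int)) := by
    rw [pv_cum_fold flags 0 [0], hfl]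
    simp only [List.singleton_append, List.cons.injEq, true_and]
    apply List.map_congr_left
    intro a ha
    rw [hfq, pv_flag_sum q minq (a+1) (by have := List.mem_range.mp ha; omega)]
    ring
  set cum := (flags.foldl (fun (st : Int × List Int) f => (st.1 + f, st.2 ++ [st.1 + f])) (0, [0])).2 with hcumdef
  have hclen : cum.length = q.length + 1 := by rw [hcum]; simp
  have hcget : ∀ i : Nat, i ≤ q.length → cum.getD i 0 = (pvC q minq i : Int) := by
    intro i hi
    rw [hcum]
    cases i with
    | zero => simp [pvC_zero]
    | succ k =>
      have hk : k < q.length := by omega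
      have : ((List.range q.length).map (fun i => (pvC q minq (i+1) : Int)))[k]? =
          some ((pvC q minq (k+1) : Int)) := by
        rw [List.getElem?_map, List.getElem?_eq_getElem (by simpa using hk)]
        simp
      simp [List.getD, this]
  rcases lt_or_ge nq 0 with hneg | hpos
  · rw [if_pos (Or.inl hneg)]
    suffices h : pvALoop q minq nq 0 0 q.length = none by rw [h, hfl]
    by_cases h2 : nq ≤ -2
    · exact pvALoop_none q minq nq _ _ _ (by omega)
    · have hm1 : nq = -1 := by omega
      subst hm1
      rcases hs : s.toList with _ | ⟨c, rest⟩
      · have : q = [] := by rw [hq, hs]; rfl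
        rw [this]
        rfl
      · have hhead : pvHeadQ s < minq := by
          rcases hPre with hemp | ⟨_, h3⟩
          · rw [hs] at hemp; cases hemp
          · by_contra hcon
            exact h3 ⟨rfl, by omega⟩
        have hq0 : q.getD 0 0 = pvHeadQ s := by
          rw [hq, hs]
          simp [pvHeadQ, hs]
        have hlen : q.length = rest.length + 1 := by rw [hq, hs]; simp
        rw [hlen]
        simp only [pvALoop, hq0, if_pos hhead]
        rw [if_neg (by omega)]
        exact pvALoop_none q minq (-1) _ _ _ (by omega)
  · obtain ⟨m, rfl⟩ : ∃ m : Nat, nq = (m : Int) := ⟨nq.toNat, (Int.toNat_of_nonneg hpos).symm⟩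
    have hA := pvALoop_main q minq m q.length 0 (by omega) (by rw [pvC_zero]; omega)
    rw [pvC_zero] at hA
    simp only [Nat.cast_zero] at hA
    -- cum[len(flags)] = total drop count
    have hcn : (PySem.List.pyGet? cum (flags.length : Int)).getD 0 = ((pvC q minq q.length : Nat) : Int) := by
      rw [hfl, PySem.List.pyGet?_natCast,
        List.getElem?_eq_getElem (by omega : q.length < cum.length)]
      simp only [Option.getD_some]
      rw [← List.getD_eq_getElem cum 0 (by omega : q.length < cum.length)]
      exact hcget q.length (le_refl _)
    by_cases hlt : m < pvC q minq q.length
    · rw [if_pos hlt] at hA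
      have hnot : ¬(((m:Nat):Int) < 0 ∨ (PySem.List.pyGet? cum (flags.length : Int)).getD 0 ≤ ((m:Nat):Int)) := by
        rintro (h | h)
        · omega
        · rw [hcn] at h; omega
      rw [if_neg hnot]
      -- run the binary search
      have hmono : ∀ i j : Nat, i ≤ j → j < cum.length → cum.getD i 0 ≤ cum.getD j 0 := by
        intro i j hij hjl
        rw [hcget i (by omega), hcget j (by omega)]
        exact_mod_cast pvC_mono q minq hij
      have hB := pvBisect_spec cum (((m:Nat):Int) + 1) hmono cum.length 0 cum.length (le_refl _)
        (Nat.zero_le _) (by omega) (by intro i hi'; omega) (by intro i h1 h2; omega)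
      set b := pvBisect cum (((m:Nat):Int) + 1) 0 cum.length cum.length with hbdef
      obtain ⟨hBlo, hBhi, -, hble⟩ := hB
      -- b ≤ len : otherwise cum[len] < m+1 contradicts the total count
      have hbn : b ≤ q.length := by
        by_contra hcon
        have := hBlo q.length (by omega)
        rw [hcget q.length (le_refl _)] at this
        omega
      -- b ≥ 1 : cum[0] = 0 < m+1
      have hb1 : 1 ≤ b := by
        by_contra hcon
        have := hBhi 0 (by omega) (by omega)
        rw [hcget 0 (Nat.zero_le _), pvC_zero] at this
        omega
      set p := b - 1 with hpdef
      have hpn : p < q.length := by omega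
      have hCp : pvC q minq p ≤ m := by
        have := hBlo p (by omega)
        rw [hcget p (by omega)] at this
        omega
      have hCp1 : m + 1 ≤ pvC q minq (p+1) := by
        have := hBhi (p+1) (by omega) (by omega)
        rw [hcget (p+1) (by omega)] at this
        omega
      have hPp : pvP q minq p = true ∧ pvC q minq p = m := by
        have hs := pvC_succ q minq p
        by_cases hp : pvP q minq p
        · exact ⟨hp, by rw [hs, if_pos hp] at hCp1; omega⟩
        · rw [hs, if_neg hp] at hCp1; omega
      have hnth := pvD_nth q minq hpn hPp.1 hPp.2
      -- the flag test equals the quality test (for a positive cut point)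
      have hpq : 1 ≤ p →
          ((PySem.List.pyGet? flags (((p:Nat):Int) - 1)).getD 0 ≠ 0 ↔
            (PySem.List.pyGet? q (((p:Nat):Int) - 1)).getD 0 < minq) := by
        intro hp1
        have hidx : (((p:Nat):Int) - 1) = (((p - 1 : Nat) : Nat) : Int) := by omega
        have hp1' : p - 1 < q.length := by omega
        rw [hidx, PySem.List.pyGet?_natCast, PySem.List.pyGet?_natCast, hfq,
          List.getElem?_map, List.getElem?_eq_getElem hp1']
        simp only [Option.map_some, Option.getD_some]
        by_cases hv : q[p-1] < minq <;> simp [hv]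
      have hgoal : pvTrimA q minq p =
          (if 0 < ((p:Nat):Int) ∧ (PySem.List.pyGet? flags (((p:Nat):Int) - 1)).getD 0 ≠ 0
           then ((p:Nat):Int) - 1 else ((p:Nat):Int)) := by
        rw [pv_trim_eq q minq p (by omega)]
        cases Nat.eq_zero_or_pos p with
        | inl h0 => rw [h0]; simp
        | inr h1 =>
          by_cases hv : (PySem.List.pyGet? q (((p:Nat):Int) - 1)).getD 0 < minq
          · rw [if_pos ⟨by omega, hv⟩, if_pos ⟨by omega, (hpq h1).mpr hv⟩]
          · rw [if_neg (by rintro ⟨-, h⟩; exact hv h),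
              if_neg (by rintro ⟨-, h⟩; exact hv ((hpq h1).mp h))]
      have hbi : ((b:Nat):Int) - 1 = ((p:Nat):Int) := by omega
      rw [hA, hnth.2, hbi]
      exact hgoal
    · rw [if_neg hlt] at hA
      rw [hA, if_pos (Or.inr (by rw [hcn]; omega)), hfl]

-- ===== VERDICT (by name: the statement is the Claim_ definition above) =====
theorem trim_sequence_spec : Claim_equal_trim_sequence := by
  intro s minq nq _ hPre
  exact pv_main s minq nq hPre
theorem trim_sequence_raises : Claim_raises_trim_sequence := by
  unfold Claim_raises_trim_sequence
  refine ⟨?_, by decide⟩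
  intro s minq nq _ hR hPre
  rcases hR with ⟨hne, hcase⟩
  rcases hPre with hemp | ⟨h0, h1⟩
  · exact hne hemp
  · rcases hcase with h | h
    · exact h0 h
    · exact h1 h

-- self-check: B's port indeed returns the stated value at the raise witness
theorem pvRaiseWitnessOut_ok : trim_sequence_alt (pvRaiseWitness_trim_sequence.1)
    (pvRaiseWitness_trim_sequence.2.1) (pvRaiseWitness_trim_sequence.2.2)
      = pvRaiseWitnessOut_trim_sequence := trim_sequence_raises.2.2.2
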